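-- pv_equiv track=rewrite | github.com/Eunyeol-Lucas/algorithm_solution | BAEKJOON/GOLD3/소수의연속합.py | set_arr
-- ===== SOURCE A (Python) =====
-- def set_arr(n):
--     # 인덱스에 따라 소수 여부를 기록하는 배열
--     primes = [False, False] + [True] * (n-1)
--     # 소수들의 누적합 저장
--     arr = [0]
--     for i in range(2, n+1):
--         # 소수일 경우 누적합 배열에 저장
--         if primes[i]:
--             arr.append(arr[-1] + i)
--             # 소수의 배수는 소수가 아니므로 n까지 소수가 아님을 체크
--             j = 2
--             while i * j <= n:
--                 primes[i*j] = False
--                 j += 1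
--     return arr
-- ===== SOURCE B (Python) =====
-- def _is_prime(i):
--     # trial division: no divisor d with d*d <= i
--     d = 2
--     while d * d <= i:
--         if i % d == 0:
--             return False
--         d += 1
--     return True
--
--
-- def set_arr(n):
--     arr = [0]
--     for i in range(2, n + 1):
--         if _is_prime(i):
--             arr.append(arr[-1] + i)
--     return arr
-- ===== Notes on version B (the rewrite author's own statement) =====
-- stated objective: simpler
-- what changed: Replaced the mutable Sieve-of-Eratosthenes boolean array with a local trial-division primality test per number; no multiples are marked and no O(n) flag array is kept.
import Mathlib
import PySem

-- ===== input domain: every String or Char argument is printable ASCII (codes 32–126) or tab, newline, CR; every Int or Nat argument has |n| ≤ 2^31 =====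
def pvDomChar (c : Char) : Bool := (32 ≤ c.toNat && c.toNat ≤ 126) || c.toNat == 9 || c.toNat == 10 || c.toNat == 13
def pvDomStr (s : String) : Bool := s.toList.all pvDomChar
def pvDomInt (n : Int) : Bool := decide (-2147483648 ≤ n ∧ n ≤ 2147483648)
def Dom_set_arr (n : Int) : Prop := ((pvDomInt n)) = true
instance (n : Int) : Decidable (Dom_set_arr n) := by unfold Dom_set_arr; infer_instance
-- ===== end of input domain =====

-- B replaces A's Sieve-of-Eratosthenes boolean array by a local trial-division
-- primality test per number; the same prefix-sum list is built (objective: simpler).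

-- ===== PORT A =====
-- inner while loop: 'while i * j <= n: primes[i*j] = False; j += 1'
-- (the '0 < i' conjunct only makes the recursion total; the caller always has i ≥ 2)
def markLoop (n i j : Int) (primes : List Bool) : List Bool :=
  if h : i * j ≤ n ∧ 0 < i then
    markLoop n i (j + 1) (primes.set (i * j).toNat false)
  else primes
termination_by (n + 1 - i * j).toNat
decreasing_by
  have h1 : i * j < i * (j + 1) := mul_lt_mul_of_pos_left (lt_add_one j) h.2
  omega

-- loop body of 'for i in range(2, n+1)'; primes[i] / primes[i*j]: the index is
-- always in range when reached (2 ≤ i, i*j ≤ n, list length n+1), so the total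
-- '.getD false' / 'List.set' forms are exact; arr[-1]: arr is never empty.
def sieveBody (n : Int) (st : List Bool × List Int) (i : Int) : List Bool × List Int :=
  if (PySem.List.pyGet? st.1 i).getD false then
    (markLoop n i 2 st.1, st.2 ++ [((PySem.List.pyGet? st.2 (-1)).getD 0) + i])
  else st

def set_arr (n : Int) : List Int :=
  let primes : List Bool := [false, false] ++ List.replicate ((n - 1).toNat) true
  ((PySem.List.pyRange 2 (n + 1) 1).foldl (sieveBody n) (primes, [0])).2

-- ===== PORT B =====
-- trial-division loop of helper _is_prime (the '0 < d' conjunct only makes the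
-- recursion total; the caller starts at d = 2)
def isPrimeLoop (i d : Int) : Bool :=
  if h : d * d ≤ i ∧ 0 < d then
    if PySem.Int.mod i d = 0 then false else isPrimeLoop i (d + 1)
  else true
termination_by (i + 1 - d).toNat
decreasing_by
  have h1 : d ≤ d * d := le_mul_of_one_le_left (le_of_lt h.2) h.2
  omega

def altBody (arr : List Int) (i : Int) : List Int :=
  if isPrimeLoop i 2 then arr ++ [((PySem.List.pyGet? arr (-1)).getD 0) + i] else arr

def set_arr_alt (n : Int) : List Int :=
  (PySem.List.pyRange 2 (n + 1) 1).foldl altBody [0]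

-- ===== PRECONDITION & SPEC =====
def Spec_set_arr (n : Int) (out : List Int) : Prop := out = set_arr_alt n
instance (n : Int) (out : List Int) : Decidable (Spec_set_arr n out) := by unfold Spec_set_arr; infer_instance

-- ===== CLAIM (what is proved, stated in full; the proofs are below) =====
def Claim_equal_set_arr : Prop := ∀ (n : Int), Dom_set_arr n → Spec_set_arr n (set_arr n)

-- ===== LEMMAS AND PROOFS =====

-- 'k has no proper prime divisor below m' — the sieve invariant predicate
-- (stated with a bounded ∃ so that 'decide (GoodN m k)' is well-formed)
abbrev GoodN (m k : ℕ) : Prop := ¬ ∃ p < m, Nat.Prime p ∧ p ∣ k ∧ p ≠ k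

theorem goodN_two (k : ℕ) : GoodN 2 k := by
  rintro ⟨p, hlt, hp, -, -⟩
  have := hp.two_le
  omega

theorem goodN_self (m : ℕ) (hm : 2 ≤ m) : GoodN m m ↔ Nat.Prime m := by
  unfold GoodN
  constructor
  · intro h
    by_contra hnp
    apply h
    have hmf : Nat.Prime m.minFac := Nat.minFac_prime (by omega)
    have hne : m.minFac ≠ m := fun he => hnp (he ▸ hmf)
    have hle : m.minFac ≤ m := Nat.minFac_le (by omega)
    exact ⟨m.minFac, by omega, hmf, Nat.minFac_dvd m, hne⟩
  · rintro hp ⟨p, hlt, hpp, hdvd, hne⟩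
    rcases hp.eq_one_or_self_of_dvd p hdvd with h1 | h1
    · exact absurd h1 hpp.one_lt.ne'
    · exact hne h1

theorem goodN_succ (m k : ℕ) :
    GoodN (m + 1) k ↔ GoodN m k ∧ ¬(Nat.Prime m ∧ m ∣ k ∧ m ≠ k) := by
  unfold GoodN
  constructor
  · intro h
    refine ⟨fun ⟨p, h2, h1, h3, h4⟩ => h ⟨p, by omega, h1, h3, h4⟩, ?_⟩
    rintro ⟨h1, h2, h3⟩
    exact h ⟨m, by omega, h1, h2, h3⟩
  · rintro ⟨h1, h2⟩ ⟨p, hp2, hp1, hp3, hp4⟩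
    rcases Nat.lt_succ_iff_lt_or_eq.mp hp2 with h | h
    · exact h1 ⟨p, h, hp1, hp3, hp4⟩
    · subst h; exact h2 ⟨hp1, hp3, hp4⟩

-- trial-division loop: true iff no divisor e ≥ d with e*e ≤ i
theorem isPrimeLoop_true_iff (i : Int) :
    ∀ (c : ℕ) (d : Int), 2 ≤ d → (i + 1 - d).toNat ≤ c →
      (isPrimeLoop i d = true ↔ ∀ e : Int, d ≤ e → e * e ≤ i → ¬ (e ∣ i)) := by
  intro c
  induction c with
  | zero =>
    intro d hd hc
    have hdd : ¬ (d * d ≤ i) := by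
      intro hle
      have : d ≤ d * d := le_mul_of_one_le_left (by omega) (by omega)
      omega
    rw [isPrimeLoop, dif_neg (by tauto)]
    constructor
    · intro _ e hde hee hdvd
      have : d * d ≤ e * e := mul_le_mul hde hde (by omega) (by omega)
      omega
    · intro _; rfl
  | succ c ih =>
    intro d hd hc
    rw [isPrimeLoop]
    by_cases hdd : d * d ≤ i
    · rw [dif_pos ⟨hdd, by omega⟩]
      have hdle : d ≤ d * d := le_mul_of_one_le_left (by omega) (by omega)
      by_cases hmod : PySem.Int.mod i d = 0
      · rw [if_pos hmod]
        have hdvd : d ∣ i := (PySem.Int.mod_eq_zero_iff_dvd i d).mp hmod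
        constructor
        · intro h; exact absurd h (by simp)
        · intro h; exact absurd hdvd (h d le_rfl hdd)
      · rw [if_neg hmod]
        have hndvd : ¬ (d ∣ i) := fun h =>
          hmod ((PySem.Int.mod_eq_zero_iff_dvd i d).mpr h)
        rw [ih (d + 1) (by omega) (by omega)]
        constructor
        · intro h e hde hee hdvd
          rcases eq_or_lt_of_le hde with h1 | h1
          · exact hndvd (h1 ▸ hdvd)
          · exact h e (by omega) hee hdvd
        · intro h e hde hee hdvd
          exact h e (by omega) hee hdvd
    · rw [dif_neg (by tauto)]
      constructor
      · intro _ e hde hee hdvd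
        have : d * d ≤ e * e := mul_le_mul hde hde (by omega) (by omega)
        omega
      · intro _; rfl

theorem isPrimeLoop_spec (i : Int) (h2 : 2 ≤ i) :
    isPrimeLoop i 2 = decide (Nat.Prime i.toNat) := by
  have hiff := isPrimeLoop_true_iff i (i + 1 - 2).toNat 2 le_rfl le_rfl
  have hcast : (i.toNat : Int) = i := Int.toNat_of_nonneg (by omega)
  have hiNat : (∀ e : Int, 2 ≤ e → e * e ≤ i → ¬ (e ∣ i)) ↔
      (∀ m : ℕ, 2 ≤ m → m * m ≤ i.toNat → ¬ (m ∣ i.toNat)) := by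
    constructor
    · intro h m hm hmm hdvd
      refine h (m : Int) (by exact_mod_cast hm) ?_ ?_
      · rw [← hcast]; exact_mod_cast hmm
      · rw [← hcast]; exact_mod_cast hdvd
    · intro h e he hee hdvd
      have he0 : 0 ≤ e := by omega
      refine h e.toNat (by omega) ?_ ?_
      · have : ((e.toNat * e.toNat : ℕ) : Int) ≤ (i.toNat : Int) := by
          push_cast [Int.toNat_of_nonneg he0, hcast]; exact hee
        exact_mod_cast this
      · have : (e.toNat : Int) ∣ (i.toNat : Int) := by
          rw [Int.toNat_of_nonneg he0, hcast]; exact hdvd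
        exact_mod_cast this
  have hprime : Nat.Prime i.toNat ↔
      (∀ m : ℕ, 2 ≤ m → m * m ≤ i.toNat → ¬ (m ∣ i.toNat)) := by
    rw [Nat.prime_def_le_sqrt]
    constructor
    · rintro ⟨-, h⟩ m hm hmm
      exact h m hm (Nat.le_sqrt.mpr hmm)
    · intro h
      exact ⟨by omega, fun m hm hsq => h m hm (Nat.le_sqrt.mp hsq)⟩
  by_cases hp : Nat.Prime i.toNat
  · simp only [hp, decide_true]
    exact hiff.mpr (hiNat.mpr (hprime.mp hp))
  · simp only [hp, decide_false]
    rw [Bool.eq_false_iff]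
    intro htrue
    exact hp (hprime.mpr (hiNat.mp (hiff.mp htrue)))

theorem getD_set_false (l : List Bool) (m k : ℕ) :
    (l.set m false).getD k false = if k = m then false else l.getD k false := by
  by_cases hk : k = m
  · subst hk
    by_cases hl : k < l.length <;>
      simp [List.getD, hl]
  · simp [List.getD, hk, Ne.symm hk]

theorem markLoop_getD (n i : Int) (hi : 2 ≤ i) :
    ∀ (c : ℕ) (j : Int), 1 ≤ j → (n + 1 - i * j).toNat ≤ c →
    ∀ (primes : List Bool) (k : ℕ),
      (markLoop n i j primes).getD k false
        = if i.toNat ∣ k ∧ i.toNat * j.toNat ≤ k ∧ (k : Int) ≤ n then false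
          else primes.getD k false := by
  intro c
  induction c with
  | zero =>
    intro j hj hc primes k
    have hmul : ((i.toNat * j.toNat : ℕ) : Int) = i * j := by
      push_cast [Int.toNat_of_nonneg (show (0:Int) ≤ i by omega),
        Int.toNat_of_nonneg (show (0:Int) ≤ j by omega)]; ring
    have hng : ¬ (i * j ≤ n) := by omega
    have hnC : ¬ (i.toNat ∣ k ∧ i.toNat * j.toNat ≤ k ∧ (k : Int) ≤ n) := by
      rintro ⟨-, h2, h3⟩; omega
    rw [markLoop, dif_neg (by tauto), if_neg hnC]
  | succ c ih =>
    intro j hj hc primes k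
    have hmul : ((i.toNat * j.toNat : ℕ) : Int) = i * j := by
      push_cast [Int.toNat_of_nonneg (show (0:Int) ≤ i by omega),
        Int.toNat_of_nonneg (show (0:Int) ≤ j by omega)]; ring
    have hstep : i * (j + 1) = i * j + i := by ring
    by_cases hg : i * j ≤ n
    · rw [markLoop, dif_pos ⟨hg, by omega⟩]
      rw [ih (j + 1) (by omega) (by omega)]
      have hjt : (j + 1).toNat = j.toNat + 1 := by omega
      have hijk : (i * j).toNat = i.toNat * j.toNat := by omega
      rw [hjt, getD_set_false, hijk]
      have hmono : i.toNat * j.toNat ≤ i.toNat * (j.toNat + 1) :=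
        Nat.mul_le_mul_left _ (by omega)
      split_ifs with hA hC1 hk1 hC2 hC3
      · rfl
      · exact absurd ⟨hA.1, by omega, hA.2.2⟩ hC1
      · rfl
      · refine absurd ⟨⟨j.toNat, hk1⟩, by omega, by omega⟩ hC2
      · obtain ⟨⟨t, ht⟩, h2, h3⟩ := hC3
        have hnA : ¬ (i.toNat * (j.toNat + 1) ≤ k) := fun hle => hA ⟨⟨t, ht⟩, hle, h3⟩
        have hub : t ≤ j.toNat := by
          by_contra hgt
          exact hnA (ht ▸ Nat.mul_le_mul_left _ (by omega))
        have hlb : j.toNat ≤ t := by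
          by_contra hlt
          have h4 : i.toNat * (t + 1) ≤ i.toNat * j.toNat :=
            Nat.mul_le_mul_left _ (by omega)
          have h5 : i.toNat * (t + 1) = i.toNat * t + i.toNat := Nat.mul_succ _ _
          omega
        have : t = j.toNat := by omega
        subst this
        exact absurd ht hk1
      · rfl
    · have hnC : ¬ (i.toNat ∣ k ∧ i.toNat * j.toNat ≤ k ∧ (k : Int) ≤ n) := by
        rintro ⟨-, h2, h3⟩; omega
      rw [markLoop, dif_neg (by tauto), if_neg hnC]

theorem pyGet_getD {α : Type} (l : List α) (m : Int) (hm : 0 ≤ m) (d : α) :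
    (PySem.List.pyGet? l m).getD d = l.getD m.toNat d := by
  rw [PySem.List.pyGet?_of_nonneg l hm]
  simp [List.getD]

theorem loop_eq (n : Int) :
    ∀ (c : ℕ) (m : Int), 2 ≤ m → (n + 1 - m).toNat ≤ c →
    ∀ (primes : List Bool) (arr : List Int),
      (∀ k : ℕ, 2 ≤ k → (k : Int) ≤ n →
        primes.getD k false = decide (GoodN m.toNat k)) →
      ((PySem.List.pyRange m (n + 1) 1).foldl (sieveBody n) (primes, arr)).2
        = (PySem.List.pyRange m (n + 1) 1).foldl altBody arr := by
  intro c
  induction c with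
  | zero =>
    intro m hm hc primes arr _
    rw [PySem.List.pyRange_one_eq_nil (by omega)]
    rfl
  | succ c ih =>
    intro m hm hc primes arr hinv
    by_cases hmn : n + 1 ≤ m
    · rw [PySem.List.pyRange_one_eq_nil hmn]
      rfl
    · rw [PySem.List.pyRange_one_cons (by omega)]
      simp only [List.foldl_cons]
      have hmt : 2 ≤ m.toNat := by omega
      have hcondA : (PySem.List.pyGet? primes m).getD false
          = decide (Nat.Prime m.toNat) := by
        rw [pyGet_getD primes m (by omega), hinv m.toNat hmt (by omega),
          decide_eq_decide]
        exact goodN_self m.toNat hmt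
      have hcondB : isPrimeLoop m 2 = decide (Nat.Prime m.toNat) :=
        isPrimeLoop_spec m hm
      have hsucc : (m + 1).toNat = m.toNat + 1 := by omega
      by_cases hp : Nat.Prime m.toNat
      · have hA : sieveBody n (primes, arr) m
            = (markLoop n m 2 primes,
               arr ++ [((PySem.List.pyGet? arr (-1)).getD 0) + m]) := by
          unfold sieveBody
          rw [hcondA]
          simp [hp]
        have hB : altBody arr m
            = arr ++ [((PySem.List.pyGet? arr (-1)).getD 0) + m] := by
          unfold altBody
          rw [hcondB]
          simp [hp]
        rw [hA, hB]
        apply ih (m + 1) (by omega) (by omega)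
        intro k hk hkn
        rw [markLoop_getD n m hm ((n + 1 - m * 2).toNat) 2 (by omega) le_rfl,
          hinv k hk hkn, hsucc]
        have htwo : ((2 : Int)).toNat = 2 := rfl
        rw [htwo]
        have hiff : GoodN (m.toNat + 1) k
            ↔ GoodN m.toNat k ∧ ¬(m.toNat ∣ k ∧ m.toNat ≠ k) := by
          rw [goodN_succ]
          constructor
          · rintro ⟨h1, h2⟩
            exact ⟨h1, fun hab => h2 ⟨hp, hab.1, hab.2⟩⟩
          · rintro ⟨h1, h2⟩
            exact ⟨h1, fun hab => h2 ⟨hab.2.1, hab.2.2⟩⟩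
        have hmark : (m.toNat ∣ k ∧ m.toNat * 2 ≤ k ∧ (k : Int) ≤ n) ↔
            (m.toNat ∣ k ∧ m.toNat ≠ k) := by
          constructor
          · rintro ⟨h1, hle, -⟩
            refine ⟨h1, fun he => ?_⟩
            omega
          · rintro ⟨⟨t, ht⟩, hne⟩
            have ht0 : t ≠ 0 := by rintro rfl; omega
            have ht1 : t ≠ 1 := by
              rintro rfl
              rw [Nat.mul_one] at ht
              exact hne ht.symm
            have h2t : m.toNat * 2 ≤ m.toNat * t := Nat.mul_le_mul_left _ (by omega)
            exact ⟨⟨t, ht⟩, by omega, hkn⟩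
        by_cases hP : m.toNat ∣ k ∧ m.toNat * 2 ≤ k ∧ (k : Int) ≤ n
        · rw [if_pos hP]
          symm
          rw [decide_eq_false_iff_not]
          intro hgood
          exact (hiff.mp hgood).2 (hmark.mp hP)
        · rw [if_neg hP, decide_eq_decide]
          constructor
          · intro hg
            exact hiff.mpr ⟨hg, fun hdk => hP (hmark.mpr hdk)⟩
          · intro hg1
            exact (hiff.mp hg1).1
      · have hA : sieveBody n (primes, arr) m = (primes, arr) := by
          unfold sieveBody
          rw [hcondA]
          simp [hp]
        have hB : altBody arr m = arr := by
          unfold altBody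
          rw [hcondB]
          simp [hp]
        rw [hA, hB]
        apply ih (m + 1) (by omega) (by omega)
        intro k hk hkn
        rw [hinv k hk hkn, hsucc, decide_eq_decide]
        rw [goodN_succ]
        constructor
        · intro h
          exact ⟨h, fun hab => hp hab.1⟩
        · exact fun h => h.1

theorem init_getD (n : Int) (k : ℕ) (hk : 2 ≤ k) (hkn : (k : Int) ≤ n) :
    (([false, false] ++ List.replicate ((n - 1).toNat) true).getD k false)
      = decide (GoodN 2 k) := by
  have h2 : decide (GoodN 2 k) = true := decide_eq_true (goodN_two k)
  rw [h2]
  obtain ⟨k', rfl⟩ : ∃ k', k = k' + 2 := ⟨k - 2, by omega⟩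
  have hlt : k' < n.toNat - 1 := by omega
  simp [List.getD, hlt]

theorem set_arr_spec' (n : Int) : set_arr n = set_arr_alt n := by
  unfold set_arr set_arr_alt
  exact loop_eq n ((n + 1 - 2).toNat) 2 le_rfl le_rfl _ [0]
    (fun k hk hkn => init_getD n k hk hkn)

-- ===== VERDICT (by name: the statement is the Claim_ definition above) =====
theorem set_arr_spec : Claim_equal_set_arr := by
  intro n _
  unfold Spec_set_arr
  exact set_arr_spec' n
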